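-- pv_equiv track=rewrite | github.com/llimonix/YaMusicBot | bot/utils/mc_gen.py | _calculate_authors
-- ===== SOURCE A (Python) =====
-- def _calculate_authors(authors):
--     # Задаем вес символов
--     weight_upper = 3
--     weight_lower = 2
--     weight_space = 1
--     weight_digit = 2
--
--     max_weight = 59
--
--     def calculate_weight(text):
--         weight = 0
--         for char in text:
--             if char.isupper():
--                 weight += weight_upper
--             elif char.islower():
--                 weight += weight_lower
--             elif char.isspace():
--                 weight += weight_space
--             elif char.isdigit():
--                 weight += weight_digit
--             else:
--                 weight += weight_lower
--         return weight
--
--     authors_list = authors.split(", ")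
--     authors_len_old = len(authors_list)
--
--     while True:
--         current_weight = calculate_weight(", ".join(authors_list))
--         if current_weight <= max_weight:
--             break
--         if len(authors_list) > 1:
--             authors_list.pop()
--         else:
--             break
--
--     authors_new = len(authors_list)
--
--     if authors_len_old > authors_new:
--         authors_n = ", ".join(authors_list) + "..."
--         return authors_n
--
--     return ", ".join(authors_list)
-- ===== SOURCE B (Python) =====
-- def _calculate_authors(authors):
--     # Single forward scan with early exit: accumulate char weights (", " separator
--     # counts 3) and stop as soon as the 59 budget is exceeded; weights are positive,
--     # so the cutoff k is final the moment the running total passes 59.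
--     parts = authors.split(", ")
--     total = 0
--     k = 0
--     for i, p in enumerate(parts):
--         if i:
--             total += 3
--         for c in p:
--             if c.isupper():
--                 total += 3
--             elif c.isspace():
--                 total += 1
--             else:
--                 total += 2
--             if total > 59:
--                 break
--         if total > 59:
--             break
--         k += 1
--     k = max(k, 1)
--
--     if k < len(parts):
--         return ", ".join(parts[:k]) + "..."
--     return ", ".join(parts)
-- ===== Notes on version B (the rewrite author's own statement) =====
-- stated objective: faster
-- what changed: A repeatedly re-weighs the entire comma-joined string after each pop of the last author; B makes one forward scan accumulating char weights (separator counted 3) and stops as soon as the 59 budget is exceeded, so it inspects O(1) characters beyond split/join.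
import Mathlib
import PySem

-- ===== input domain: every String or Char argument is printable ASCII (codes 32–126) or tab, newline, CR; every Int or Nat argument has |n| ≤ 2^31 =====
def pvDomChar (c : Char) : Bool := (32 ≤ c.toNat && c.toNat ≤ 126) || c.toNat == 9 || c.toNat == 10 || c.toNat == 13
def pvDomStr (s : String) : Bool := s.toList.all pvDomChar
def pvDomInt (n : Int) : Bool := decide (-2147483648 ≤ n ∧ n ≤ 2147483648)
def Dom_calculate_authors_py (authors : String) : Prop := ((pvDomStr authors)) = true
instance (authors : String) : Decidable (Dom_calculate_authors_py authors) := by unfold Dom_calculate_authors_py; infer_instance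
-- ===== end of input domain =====

-- B replaces A's pop-and-reweigh loop by a single forward scan with early exit
-- (weights are positive, so the cutoff is final once the running total passes 59).

-- ===== PORT A =====
-- char weight as in A's calculate_weight (branch order kept)
def pvWeightChar (c : Char) : Int :=
  if PySem.Chars.isupper c then 3
  else if PySem.Chars.islower c then 2
  else if PySem.Chars.isspace c then 1
  else if PySem.Chars.isdigit c then 2
  else 2

-- A's calculate_weight: a running-total loop over the text
def pvCalcWeight (text : List Char) : Int :=
  text.foldl (fun w c => w + pvWeightChar c) 0

-- A's while-loop: reweigh the full join, pop the last author while too heavy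
def pvLoopA (l : List (List Char)) : List (List Char) :=
  if pvCalcWeight (PySem.Chars.join [',', ' '] l) ≤ 59 then l
  else if 1 < l.length then pvLoopA l.dropLast
  else l
termination_by l.length
decreasing_by simpa [List.length_dropLast] using by omega

def calculate_authors_py (authors : String) : String :=
  let authors_list := PySem.Chars.splitOn authors.toList [',', ' ']
  let kept := pvLoopA authors_list
  if kept.length < authors_list.length then
    String.ofList (PySem.Chars.join [',', ' '] kept ++ ['.', '.', '.'])
  else
    String.ofList (PySem.Chars.join [',', ' '] kept)

-- ===== PORT B =====
-- Source B's char weight (upper 3, whitespace 1, everything else 2)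
def pvCharW (c : Char) : Int :=
  if PySem.Chars.isupper c then 3
  else if PySem.Chars.isspace c then 1
  else 2

-- Source B's inner char loop: accumulate, break as soon as the total passes 59
def pvCharLoop : List Char → Int → Int
  | [], total => total
  | c :: cs, total =>
      let t := total + pvCharW c
      if 59 < t then t else pvCharLoop cs t

-- Source B's outer loop: count fitting authors (+3 separator except before the first),
-- break at the first author that does not fit
def pvLoopB : List (List Char) → Int → Bool → Nat
  | [], _, _ => 0
  | p :: rest, total, isFirst =>
      let t0 := if isFirst then total else total + 3
      let t1 := pvCharLoop p t0
      if 59 < t1 then 0 else pvLoopB rest t1 false + 1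

def calculate_authors_py_alt (authors : String) : String :=
  let parts := PySem.Chars.splitOn authors.toList [',', ' ']
  let k := max (pvLoopB parts 0 true) 1
  if k < parts.length then
    String.ofList (PySem.Chars.join [',', ' '] (parts.take k) ++ ['.', '.', '.'])
  else
    String.ofList (PySem.Chars.join [',', ' '] parts)

-- ===== PRECONDITION & SPEC =====
def Spec_calculate_authors_py (authors : String) (out : String) : Prop := out = calculate_authors_py_alt authors
instance (authors : String) (out : String) : Decidable (Spec_calculate_authors_py authors out) := by unfold Spec_calculate_authors_py; infer_instance

-- ===== CLAIM (what is proved, stated in full; the proofs are below) =====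
def Claim_equal_calculate_authors_py : Prop := ∀ (authors : String), Dom_calculate_authors_py authors → Spec_calculate_authors_py authors (calculate_authors_py authors)

-- ===== LEMMAS AND PROOFS =====

-- proof-level helpers: per-author weight, the weight list (", " counted 3), and an
-- uninterrupted prefix-sum cutoff over that list
def pvAuthorW (p : List Char) : Int := (p.map pvCharW).sum

def pvWs : List (List Char) → List Int
  | [] => []
  | p :: rest => pvAuthorW p :: rest.map (fun q => 3 + pvAuthorW q)

def pvGo : List Int → Int → Nat
  | [], _ => 0
  | w :: rest, total => if 59 < total + w then 0 else pvGo rest (total + w) + 1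

def pvWsF : List (List Char) → Bool → List Int
  | [], _ => []
  | p :: rest, first => ((if first then 0 else 3) + pvAuthorW p) :: pvWsF rest false

-- the two char-weight functions agree (lower/digit/other all weigh 2; space is never lower)
theorem pvWeightChar_eq (c : Char) : pvWeightChar c = pvCharW c := by
  unfold pvWeightChar pvCharW
  by_cases h1 : PySem.Chars.isupper c = true
  · simp [h1]
  · by_cases h2 : PySem.Chars.islower c = true
    · have h3 : PySem.Chars.isspace c = false := by
        simp only [PySem.Chars.islower, Bool.and_eq_true, decide_eq_true_eq, Char.le_def,
          UInt32.le_iff_toNat_le] at h2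
        have ha : ('a'.val.toNat) = 97 := rfl
        have hz : ('z'.val.toNat) = 122 := rfl
        simp only [PySem.Chars.isspace, Char.toNat]
        simp only [Bool.or_eq_false_iff, Bool.and_eq_false_iff, decide_eq_false_iff_not]
        omega
      simp [h1, h2, h3]
    · simp [h1, h2]

theorem pvCalcWeight_eq_sum (cs : List Char) : pvCalcWeight cs = pvAuthorW cs := by
  unfold pvCalcWeight pvAuthorW
  rw [PySem.List.foldl_add cs pvWeightChar 0]
  simp only [zero_add]
  exact congrArg List.sum (List.map_congr_left fun c _ => pvWeightChar_eq c)

theorem pvCalcWeight_append (a b : List Char) :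
    pvCalcWeight (a ++ b) = pvCalcWeight a + pvCalcWeight b := by
  simp [pvCalcWeight_eq_sum, pvAuthorW]

-- weight of the ", "-join equals the sum of B's per-author weights
theorem pvCalcWeight_join (p : List Char) (rest : List (List Char)) :
    pvCalcWeight (PySem.Chars.join [',', ' '] (p :: rest)) =
      pvAuthorW p + (rest.map (fun q => 3 + pvAuthorW q)).sum := by
  induction rest generalizing p with
  | nil => simp [PySem.Chars.join_singleton, pvCalcWeight_eq_sum]
  | cons q rs ih =>
    rw [PySem.Chars.join_cons_cons, pvCalcWeight_append, pvCalcWeight_append, ih]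
    have hsep : pvCalcWeight [',', ' '] = 3 := by decide
    rw [hsep]
    simp [pvCalcWeight_eq_sum]
    ring

theorem pvCalcWeight_join_eq_ws (l : List (List Char)) :
    pvCalcWeight (PySem.Chars.join [',', ' '] l) = (pvWs l).sum := by
  cases l with
  | nil => simp [PySem.Chars.join_nil, pvCalcWeight, pvWs]
  | cons p rest => rw [pvCalcWeight_join]; simp [pvWs]

theorem pvCharW_nonneg (c : Char) : 0 ≤ pvCharW c := by
  unfold pvCharW; split_ifs <;> norm_num

theorem pvAuthorW_nonneg (p : List Char) : 0 ≤ pvAuthorW p := by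
  apply List.sum_nonneg
  intro x hx
  obtain ⟨c, _, rfl⟩ := List.mem_map.mp hx
  exact pvCharW_nonneg c

theorem pvWs_nonneg (l : List (List Char)) : ∀ w ∈ pvWs l, 0 ≤ w := by
  cases l with
  | nil => simp [pvWs]
  | cons p rest =>
    intro w hw
    simp [pvWs] at hw
    rcases hw with rfl | ⟨q, _, rfl⟩
    · exact pvAuthorW_nonneg p
    · have := pvAuthorW_nonneg q; omega

theorem pvWs_length (l : List (List Char)) : (pvWs l).length = l.length := by
  cases l <;> simp [pvWs]

theorem pvGo_le_length (ws : List Int) (t : Int) : pvGo ws t ≤ ws.length := by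
  induction ws generalizing t with
  | nil => simp [pvGo]
  | cons w rest ih =>
    unfold pvGo
    split_ifs
    · simp
    · simpa using ih (t + w)

-- any prefix whose total fits is counted by pvGo (entries nonnegative)
theorem pvGo_ge (ws : List Int) (t : Int) (hnn : ∀ w ∈ ws, 0 ≤ w)
    (k : Nat) (hk : k ≤ ws.length) (hsum : t + (ws.take k).sum ≤ 59) :
    k ≤ pvGo ws t := by
  induction ws generalizing t k with
  | nil => simp at hk; simp [pvGo]; omega
  | cons w rest ih =>
    cases k with
    | zero => simp
    | succ j =>
      have hw59 : ¬ 59 < t + w := by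
        have hrest : 0 ≤ ((rest.take j).sum) := by
          apply List.sum_nonneg
          intro x hx
          exact hnn x (List.mem_cons_of_mem w (List.mem_of_mem_take hx))
        simp [List.take_succ_cons] at hsum
        omega
      unfold pvGo
      simp [hw59]
      apply ih (t + w) (fun x hx => hnn x (List.mem_cons_of_mem w hx)) j
      · simpa using hk
      · simp [List.take_succ_cons] at hsum; omega

-- the prefix pvGo counts does fit
theorem pvGo_sum_le (ws : List Int) (t : Int) (ht : t ≤ 59) :
    t + (ws.take (pvGo ws t)).sum ≤ 59 := by
  induction ws generalizing t with
  | nil => simpa [pvGo]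
  | cons w rest ih =>
    unfold pvGo
    split_ifs with h
    · simpa
    · push Not at h
      have := ih (t + w) h
      simp [List.take_succ_cons]
      omega

-- one-step unfolding of pvGo on a cons
theorem pvGo_cons (w : Int) (rest : List Int) (t : Int) :
    pvGo (w :: rest) t = if 59 < t + w then 0 else pvGo rest (t + w) + 1 := rfl

-- dropping the last entry does not move a cutoff that falls strictly inside the list
theorem pvGo_dropLast (ws : List Int) (t : Int) (h : pvGo ws t < ws.length) :
    pvGo ws.dropLast t = pvGo ws t := by
  induction ws generalizing t with
  | nil => simp [pvGo] at h
  | cons w rest ih =>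
    cases rest with
    | nil =>
      have hd : ([w] : List Int).dropLast = [] := rfl
      rw [hd, pvGo_cons]
      split_ifs with hw
      · rfl
      · rw [pvGo_cons, if_neg hw] at h
        simp [pvGo] at h
    | cons q rs =>
      rw [List.dropLast_cons₂, pvGo_cons, pvGo_cons]
      split_ifs with hw
      · rfl
      · have h' : pvGo (q :: rs) (t + w) < (q :: rs).length := by
          rw [pvGo_cons, if_neg hw] at h
          simpa using h
        rw [ih (t + w) h']

theorem pvWs_dropLast (l : List (List Char)) (h : 1 < l.length) :
    pvWs l.dropLast = (pvWs l).dropLast := by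
  cases l with
  | nil => simp at h
  | cons p rest =>
    cases rest with
    | nil => simp at h
    | cons q rs =>
      cases rs with
      | nil => simp [pvWs]
      | cons a b => simp [List.dropLast_cons₂, pvWs, List.map_dropLast]

-- A's pop loop keeps exactly B's prefix
theorem pvLoopA_eq_take (l : List (List Char)) :
    pvLoopA l = l.take (max (pvGo (pvWs l) 0) 1) := by
  induction l using pvLoopA.induct with
  | case1 l hle =>
    rw [pvLoopA, if_pos hle]
    rw [pvCalcWeight_join_eq_ws] at hle
    have hall : l.length ≤ pvGo (pvWs l) 0 := by
      have := pvGo_ge (pvWs l) 0 (pvWs_nonneg l) (pvWs l).length le_rfl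
        (by simpa using hle)
      simpa [pvWs_length] using this
    exact (List.take_of_length_le (le_trans hall (Nat.le_max_left _ _))).symm
  | case2 l hgt hlen ih =>
    rw [pvLoopA, if_neg hgt, if_pos hlen]
    rw [ih, pvWs_dropLast l hlen]
    rw [pvCalcWeight_join_eq_ws] at hgt
    have hglt : pvGo (pvWs l) 0 < (pvWs l).length := by
      have hle := pvGo_le_length (pvWs l) 0
      rcases Nat.lt_or_ge (pvGo (pvWs l) 0) (pvWs l).length with h | h
      · exact h
      · exfalso
        have heq : pvGo (pvWs l) 0 = (pvWs l).length := le_antisymm hle h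
        have := pvGo_sum_le (pvWs l) 0 (by norm_num)
        rw [heq, List.take_length] at this
        omega
    rw [pvGo_dropLast (pvWs l) 0 hglt]
    have hlw := pvWs_length l
    have hk : max (pvGo (pvWs l) 0) 1 ≤ l.length - 1 := by omega
    rw [List.dropLast_eq_take, List.take_take]
    congr 1
    omega
  | case3 l hgt hlen =>
    rw [pvLoopA, if_neg hgt, if_neg hlen]
    have h1 : l.length ≤ 1 := by omega
    exact (List.take_of_length_le (le_trans h1 (Nat.le_max_right _ _))).symm

-- the early-exit char loop either computes the exact total, or breaks with both the
-- truncated and the full total above 59 (char weights are nonnegative)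
theorem pvCharLoop_spec (p : List Char) (t : Int) :
    pvCharLoop p t = t + pvAuthorW p ∨
      (59 < pvCharLoop p t ∧ 59 < t + pvAuthorW p) := by
  induction p generalizing t with
  | nil => left; simp [pvCharLoop, pvAuthorW]
  | cons c cs ih =>
    have hsum : pvAuthorW (c :: cs) = pvCharW c + pvAuthorW cs := by
      simp [pvAuthorW]
    simp only [pvCharLoop]
    split_ifs with h
    · right
      have := pvAuthorW_nonneg cs
      constructor <;> omega
    · rcases ih (t + pvCharW c) with h' | ⟨h1, h2⟩
      · left; rw [h', hsum]; ring
      · right; exact ⟨h1, by rw [hsum]; omega⟩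

theorem pvWsF_false (l : List (List Char)) :
    pvWsF l false = l.map (fun q => 3 + pvAuthorW q) := by
  induction l with
  | nil => simp [pvWsF]
  | cons p rest ih => simp [pvWsF, ih]

theorem pvWsF_true (l : List (List Char)) : pvWsF l true = pvWs l := by
  cases l with
  | nil => simp [pvWsF, pvWs]
  | cons p rest => simp [pvWsF, pvWs, pvWsF_false]

-- B's break-early scan equals the uninterrupted prefix-sum cutoff
theorem pvLoopB_eq (l : List (List Char)) (t : Int) (first : Bool) :
    pvLoopB l t first = pvGo (pvWsF l first) t := by
  induction l generalizing t first with
  | nil => simp [pvLoopB, pvWsF, pvGo]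
  | cons p rest ih =>
    simp only [pvLoopB, pvWsF, pvGo_cons]
    have ht : t + ((if first then 0 else 3) + pvAuthorW p) =
        (if first = true then t else t + 3) + pvAuthorW p := by
      split_ifs <;> ring
    rcases pvCharLoop_spec p (if first = true then t else t + 3) with h | ⟨h1, h2⟩
    · rw [h, ht]
      split_ifs <;> simp [ih]
    · rw [if_pos h1, if_pos (by omega)]

-- ===== VERDICT (by name: the statement is the Claim_ definition above) =====
theorem calculate_authors_py_spec : Claim_equal_calculate_authors_py := by
  intro authors _
  unfold Spec_calculate_authors_py
  simp only [calculate_authors_py, calculate_authors_py_alt]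
  set parts := PySem.Chars.splitOn authors.toList [',', ' '] with hparts
  rw [pvLoopB_eq, pvWsF_true]
  set K := max (pvGo (pvWs parts) 0) 1 with hK
  rw [pvLoopA_eq_take parts]
  by_cases h : K < parts.length
  · rw [if_pos h, if_pos (by simp [List.length_take]; omega)]
  · rw [List.take_of_length_le (le_of_not_gt h)]
    rw [if_neg (lt_irrefl _), if_neg h]
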